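-- pv_equiv track=rewrite | github.com/g-simmons/289G_NLP_project_FQ2020 | py/classes.py | _invert_schema
-- ===== SOURCE A (Python) =====
-- from collections import Counter, OrderedDict
--
-- def _invert_schema(schema):
--     inverted_schema = {}
--
--     for rel, argsets in schema.items():
--         for argset in argsets:
--             if argset not in inverted_schema.keys():
--                 inverted_schema[argset] = Counter()
--             inverted_schema[argset][rel] += 1
--
--     return inverted_schema
-- ===== SOURCE B (Python) =====
-- from collections import Counter
--
-- def _invert_schema(schema):
--     # Output-driven rebuild: first determine the output keys (distinct argsets in
--     # first-appearance order), then, for each output key, count its relations by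
--     # a fresh scan over the whole schema. No shared accumulator dict is threaded
--     # through the input traversal.
--     argset_order = list(dict.fromkeys(
--         a for argsets in schema.values() for a in argsets))
--     return {
--         argset: Counter(rel
--                         for rel, argsets in schema.items()
--                         for a in argsets
--                         if a == argset)
--         for argset in argset_order
--     }
-- ===== Notes on version B (the rewrite author's own statement) =====
-- stated objective: alternative
-- what changed: A threads one shared dict-of-Counters through a single interleaved nested loop (setdefault + in-place increment); B is output-driven: it first computes the output keys (distinct argsets in first-appearance order) and then, for each key, counts its relations by a fresh full scan of the schema, with no accumulator threaded through the input traversal.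
import Mathlib
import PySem

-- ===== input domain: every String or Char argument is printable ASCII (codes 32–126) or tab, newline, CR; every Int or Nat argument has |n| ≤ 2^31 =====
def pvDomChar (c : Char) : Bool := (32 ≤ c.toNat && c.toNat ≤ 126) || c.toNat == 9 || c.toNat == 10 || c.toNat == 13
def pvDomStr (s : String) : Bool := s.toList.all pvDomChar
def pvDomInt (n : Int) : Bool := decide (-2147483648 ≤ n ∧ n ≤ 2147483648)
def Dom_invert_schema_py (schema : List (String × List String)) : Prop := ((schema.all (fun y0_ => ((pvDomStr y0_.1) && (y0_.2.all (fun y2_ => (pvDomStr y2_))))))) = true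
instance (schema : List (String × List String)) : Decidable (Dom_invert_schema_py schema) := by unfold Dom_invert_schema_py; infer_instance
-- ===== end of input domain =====

-- B replaces A's single-pass accumulator loop (setdefault + in-place Counter increment) by an
-- output-driven rebuild: first the distinct argsets in first-appearance order, then a fresh full
-- scan of the schema per argset to count its relations; alternative decomposition, not faster.


-- ===== PORT A =====
-- Literal port of A: one nested loop; `if argset not in keys: inverted_schema[argset] = Counter()`,
-- then `inverted_schema[argset][rel] += 1` (an in-place Counter update = Dict.modify of the inner dict).
def invert_schema_py (schema : List (String × List String)) : List (String × List (String × Int)) :=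
  let inverted :=
    schema.foldl
      (fun inv p =>
        p.2.foldl
          (fun inv argset =>
            let inv := if inv.contains argset then inv else inv.insert argset PySem.Dict.empty
            inv.modify argset PySem.Dict.empty (fun c => c.modify p.1 0 (· + 1)))
          inv)
      PySem.Dict.empty
  inverted.items.map (fun q => (q.1, q.2.items))

-- ===== PORT B =====
-- Literal port of B: `argset_order = dict.fromkeys(a for argsets in values for a in argsets)`
-- (= PySem.Set.ofList of the flattened argsets), then a dict comprehension mapping each argset to
-- `Counter(rel for rel, argsets in schema.items() for a in argsets if a == argset)`.
def invert_schema_py_alt (schema : List (String × List String)) : List (String × List (String × Int)) :=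
  let argset_order := PySem.Set.ofList (schema.flatMap (fun p => p.2))
  argset_order.map (fun argset =>
    (argset,
      (PySem.Dict.counter
        (schema.flatMap (fun p => (p.2.filter (fun a => a == argset)).map (fun _ => p.1)))).items))

-- ===== PRECONDITION & SPEC =====
def Spec_invert_schema_py (schema : List (String × List String)) (out : List (String × List (String × Int))) : Prop := out = invert_schema_py_alt schema
instance (schema : List (String × List String)) (out : List (String × List (String × Int))) : Decidable (Spec_invert_schema_py schema out) := by unfold Spec_invert_schema_py; infer_instance

-- ===== CLAIM (what is proved, stated in full; the proofs are below) =====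
def Claim_equal_invert_schema_py : Prop := ∀ (schema : List (String × List String)), Dom_invert_schema_py schema → Spec_invert_schema_py schema (invert_schema_py schema)

-- ===== LEMMAS AND PROOFS =====

-- Generic loop shapes for "ensure key, then update its value" folds over a dict.
theorem pv_foldl_keys_gen {κ ν β : Type} [BEq κ] (step : PySem.Dict κ ν → β → PySem.Dict κ ν)
    (key : β → κ)
    (hk : ∀ d q, (step d q).keys = PySem.Set.add d.keys (key q)) :
    ∀ (l : List β) (d : PySem.Dict κ ν),
      (l.foldl step d).keys = PySem.Set.update d.keys (l.map key) := by
  intro l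
  induction l with
  | nil => intro d; simp [PySem.Set.update]
  | cons q l ih =>
      intro d
      simp only [List.foldl_cons, List.map_cons, PySem.Set.update_cons, ih, hk]

theorem pv_foldl_getD_gen {κ ν β : Type} [BEq κ] [LawfulBEq κ]
    (step : PySem.Dict κ ν → β → PySem.Dict κ ν) (key : β → κ) (u : β → ν → ν) (d0 : ν)
    (hg : ∀ d q a, (step d q).getD a d0 = if key q == a then u q (d.getD a d0) else d.getD a d0) :
    ∀ (l : List β) (d : PySem.Dict κ ν) (a : κ),
      (l.foldl step d).getD a d0
        = (l.filter (fun q => key q == a)).foldl (fun c q => u q c) (d.getD a d0) := by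
  intro l
  induction l with
  | nil => intro d a; simp
  | cons q l ih =>
      intro d a
      simp only [List.foldl_cons, ih, hg]
      by_cases h : key q == a
      · simp [h]
      · simp [h]

-- Proof-side abbreviations: the flattened (argset, rel) event list, A's loop body, and
-- the per-argset relation list.
def pvPairs (schema : List (String × List String)) : List (String × String) :=
  schema.flatMap (fun p => p.2.map (fun argset => (argset, p.1)))

def pvStepA (inv : PySem.Dict String (PySem.Dict String Int)) (q : String × String) :
    PySem.Dict String (PySem.Dict String Int) :=
  let inv := if inv.contains q.1 then inv else inv.insert q.1 PySem.Dict.empty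
  inv.modify q.1 PySem.Dict.empty (fun c => c.modify q.2 0 (· + 1))

def pvRels (schema : List (String × List String)) (a : String) : List String :=
  ((pvPairs schema).filter (fun q => q.1 == a)).map (·.2)

-- A's nested loop is the fold of pvStepA over the flattened event list.
theorem pv_A_flat (schema : List (String × List String)) :
    ∀ d, schema.foldl
      (fun inv p =>
        p.2.foldl
          (fun inv argset =>
            let inv := if inv.contains argset then inv else inv.insert argset PySem.Dict.empty
            inv.modify argset PySem.Dict.empty (fun c => c.modify p.1 0 (· + 1)))
          inv)
      d = (pvPairs schema).foldl pvStepA d := by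
  induction schema with
  | nil => intro d; rfl
  | cons p s ih =>
      intro d
      simp only [List.foldl_cons, pvPairs, List.flatMap_cons, List.foldl_append, ih]
      congr 1
      rw [List.foldl_map]
      rfl

theorem pv_stepA_keys (d : PySem.Dict String (PySem.Dict String Int)) (q : String × String) :
    (pvStepA d q).keys = PySem.Set.add d.keys q.1 := by
  unfold pvStepA
  by_cases hc : d.contains q.1
  · have hm : q.1 ∈ d.keys := (PySem.Dict.contains_iff_mem_keys d q.1).mp hc
    simp only [hc, if_true, PySem.Dict.keys_modify, PySem.Dict.keys_insert_of_contains d _ hc,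
      PySem.Set.add_of_mem hm]
  · have hc' : d.contains q.1 = false := by simpa using hc
    have hm : q.1 ∉ d.keys := fun h => hc ((PySem.Dict.contains_iff_mem_keys d q.1).mpr h)
    rw [if_neg (by simp [hc']), PySem.Dict.keys_modify,
      PySem.Dict.keys_insert_of_contains _ _ (PySem.Dict.contains_insert_self d q.1 _),
      PySem.Dict.keys_insert_of_not_contains d _ hc', PySem.Set.add_of_not_mem hm]

theorem pv_stepA_getD (d : PySem.Dict String (PySem.Dict String Int)) (q : String × String)
    (a : String) :
    (pvStepA d q).getD a PySem.Dict.empty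
      = if q.1 == a then (d.getD a PySem.Dict.empty).modify q.2 0 (· + 1)
        else d.getD a PySem.Dict.empty := by
  unfold pvStepA
  by_cases hc : d.contains q.1
  · rw [if_pos hc, PySem.Dict.getD_modify]
    by_cases h : q.1 = a
    · subst h; simp
    · rw [if_neg (fun hh : a = q.1 => h hh.symm), if_neg (by simpa using h)]
  · have hc' : d.contains q.1 = false := by simpa using hc
    rw [if_neg (by simp [hc']), PySem.Dict.getD_modify]
    by_cases h : q.1 = a
    · subst h
      simp [PySem.Dict.getD_insert_self, PySem.Dict.getD_of_not_contains d _ hc']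
    · have h' : a ≠ q.1 := fun hh => h hh.symm
      rw [if_neg h', if_neg (by simpa using h), PySem.Dict.getD_insert_of_ne d _ _ h']

-- Keys of A's fold: the distinct argsets, in first-appearance order.
theorem pv_invA_keys (schema : List (String × List String)) :
    ((pvPairs schema).foldl pvStepA PySem.Dict.empty).keys
      = PySem.Set.ofList ((pvPairs schema).map (·.1)) := by
  rw [pv_foldl_keys_gen pvStepA (fun q => q.1) pv_stepA_keys, PySem.Dict.keys_empty,
    PySem.Set.update_nil_left]

-- Value at key a of A's fold: Counter of a's relation list.
theorem pv_invA_getD (schema : List (String × List String)) (a : String) :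
    ((pvPairs schema).foldl pvStepA PySem.Dict.empty).getD a PySem.Dict.empty
      = PySem.Dict.counter (pvRels schema a) := by
  rw [pv_foldl_getD_gen pvStepA (fun q => q.1) (fun q c => c.modify q.2 0 (· + 1))
      PySem.Dict.empty pv_stepA_getD, PySem.Dict.getD_empty,
    PySem.Dict.counter_eq_foldl, pvRels, List.foldl_map]

-- The first components of the flattened pairs are exactly the flattened argsets.
theorem pv_pairs_fst (schema : List (String × List String)) :
    (pvPairs schema).map (·.1) = schema.flatMap (fun p => p.2) := by
  induction schema with
  | nil => rfl
  | cons p s ih =>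
      simp only [pvPairs, List.flatMap_cons, List.map_append, List.map_map] at ih ⊢
      rw [ih]
      congr 1
      simp [Function.comp_def]

-- a's relation list = B's per-key generator over the schema.
theorem pv_rels_eq (schema : List (String × List String)) (a : String) :
    pvRels schema a
      = schema.flatMap (fun p => (p.2.filter (fun x => x == a)).map (fun _ => p.1)) := by
  induction schema with
  | nil => rfl
  | cons p s ih =>
      simp only [pvRels, pvPairs, List.flatMap_cons, List.filter_append, List.map_append] at *
      rw [ih]
      congr 1
      rw [List.filter_map]
      simp [Function.comp_def]

-- ===== VERDICT (by name: the statement is the Claim_ definition above) =====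
theorem invert_schema_py_spec : Claim_equal_invert_schema_py := by
  intro schema _
  show invert_schema_py schema = invert_schema_py_alt schema
  simp only [invert_schema_py, invert_schema_py_alt]
  rw [pv_A_flat schema PySem.Dict.empty]
  have hnd : ((pvPairs schema).foldl pvStepA PySem.Dict.empty).keys.Nodup := by
    rw [pv_invA_keys]; exact PySem.Set.nodup_ofList _
  rw [PySem.Dict.items_eq_map_keys _ hnd PySem.Dict.empty, pv_invA_keys, List.map_map,
    pv_pairs_fst]
  apply List.map_congr_left
  intro a _
  simp only [Function.comp, pv_invA_getD, pv_rels_eq]
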